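-- pv_equiv track=rewrite | github.com/Chrono-Edge/disco-tupper-bot | utils/tupper_template.py | unparse_template
-- ===== SOURCE A (Python) =====
-- def unparse_template(text):
--     text = text[1:-1]
--
--     buffer = ""
--     escape = False
--     in_block = False
--     i = 0
--     while i < len(text):
--         ch = text[i]
--         if in_block:
--             buffer += ch
--
--             i += 1
--
--             continue
--
--         if escape:
--             buffer += ch
--
--             escape = False
--
--             i += 1
--
--             continue
--
--         if ch == ".":
--             buffer += "?"
--         elif ch == "\\":
--             escape = True
--         elif ch == "[":
--             buffer += ch
--
--             in_block = True
--         elif ch == "]":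
--             buffer += ch
--
--             in_block = False
--         elif text[i : i + 4] == "(.*)":
--             buffer += "*"
--
--             i += 3
--         else:
--             buffer += ch
--
--         i += 1
--
--     return buffer
-- ===== SOURCE B (Python) =====
-- def unparse_template(text):
--     s = text[1:-1]
--     out = []
--     i = 0
--     n = len(s)
--     while i < n:
--         ch = s[i]
--         if ch == "\\":
--             # escape: emit the next char literally (a trailing lone backslash emits nothing)
--             out.append(s[i + 1 : i + 2])
--             i += 2
--         elif ch == "[":
--             # from the first unescaped '[' on, the rest is copied verbatim
--             out.append(s[i:])
--             break
--         elif s.startswith("(.*)", i):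
--             out.append("*")
--             i += 4
--         elif ch == ".":
--             out.append("?")
--             i += 1
--         else:
--             out.append(ch)
--             i += 1
--     return "".join(out)
-- ===== Notes on version B (the rewrite author's own statement) =====
-- stated objective: faster
-- what changed: Replaced the char-cursor state machine with escape/in_block boolean flags by a stateless single-pass tokenizer that consumes whole tokens (backslash pair, everything after an unescaped bracket verbatim in one slice, the 4-char star group, the dot) into a list joined once.
import Mathlib
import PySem

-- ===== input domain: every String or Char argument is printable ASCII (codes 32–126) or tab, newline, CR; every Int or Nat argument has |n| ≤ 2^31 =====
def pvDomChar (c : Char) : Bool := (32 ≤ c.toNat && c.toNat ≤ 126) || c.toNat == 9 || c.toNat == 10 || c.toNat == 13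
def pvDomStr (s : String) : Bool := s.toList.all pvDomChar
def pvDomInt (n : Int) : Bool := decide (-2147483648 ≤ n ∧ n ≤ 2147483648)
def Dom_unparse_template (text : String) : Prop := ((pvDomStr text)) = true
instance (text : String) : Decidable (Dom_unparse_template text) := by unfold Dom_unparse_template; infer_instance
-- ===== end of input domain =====

-- B replaces A's flag-driven char-by-char state machine with a single token-based scan (escape pair / bracket tail / '(.*)' / '.' consumed as whole tokens into a joined list); objective: faster (measured: list-append + single join and a one-slice bracket tail, vs per-char string concatenation).

-- ===== PORT A =====
-- Port of A: cursor loop as structural recursion over the remaining suffix of text[1:-1],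
-- with the same state (buffer, escape, in_block); s[i:i+4] == "(.*)" is `take 4` of the suffix.
def unparse_template_loop : List Char → List Char → Bool → Bool → List Char
  | [], buf, _, _ => buf
  | ch :: rest, buf, escape, in_block =>
    if in_block then unparse_template_loop rest (buf ++ [ch]) escape in_block
    else if escape then unparse_template_loop rest (buf ++ [ch]) false in_block
    else if ch = '.' then unparse_template_loop rest (buf ++ ['?']) escape in_block
    else if ch = '\\' then unparse_template_loop rest buf true in_block
    else if ch = '[' then unparse_template_loop rest (buf ++ [ch]) escape true
    else if ch = ']' then unparse_template_loop rest (buf ++ [ch]) escape false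
    else if (ch :: rest).take 4 = ['(', '.', '*', ')'] then
      unparse_template_loop (rest.drop 3) (buf ++ ['*']) escape in_block
    else unparse_template_loop rest (buf ++ [ch]) escape in_block
  termination_by l _ _ _ => l.length
  decreasing_by all_goals simp

def unparse_template (text : String) : String :=
  String.ofList (unparse_template_loop (PySem.Chars.slice text.toList (some 1) (some (-1))) [] false false)

-- ===== PORT B =====
-- Port of B: single token-directed scan; multi-char tokens consumed by pattern matching,
-- no state flags; everything after an unescaped '[' is the final token.
def unparse_template_go : List Char → List Char
  | [] => []
  | '\\' :: rest => rest.take 1 ++ unparse_template_go (rest.drop 1)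
  | '[' :: rest => '[' :: rest
  | '(' :: '.' :: '*' :: ')' :: rest => '*' :: unparse_template_go rest
  | '.' :: rest => '?' :: unparse_template_go rest
  | ch :: rest => ch :: unparse_template_go rest
  termination_by l => l.length
  decreasing_by all_goals (simp <;> omega)

def unparse_template_alt (text : String) : String :=
  String.ofList (unparse_template_go (PySem.Chars.slice text.toList (some 1) (some (-1))))

-- ===== PRECONDITION & SPEC =====
def Spec_unparse_template (text : String) (out : String) : Prop := out = unparse_template_alt text
instance (text : String) (out : String) : Decidable (Spec_unparse_template text out) := by unfold Spec_unparse_template; infer_instance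

-- ===== CLAIM (what is proved, stated in full; the proofs are below) =====
def Claim_equal_unparse_template : Prop := ∀ (text : String), Dom_unparse_template text → Spec_unparse_template text (unparse_template text)

-- ===== LEMMAS AND PROOFS =====

-- in_block: A copies the rest verbatim
theorem loop_in_block (l : List Char) : ∀ (buf : List Char) (e : Bool),
    unparse_template_loop l buf e true = buf ++ l := by
  induction l with
  | nil => intro buf e; simp [unparse_template_loop]
  | cons ch rest ih =>
    intro buf e
    simp [unparse_template_loop, ih]

theorem loop_eq_go (l : List Char) : ∀ (buf : List Char),
    unparse_template_loop l buf false false = buf ++ unparse_template_go l := by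
  induction l using unparse_template_go.induct with
  | case1 => intro buf; simp [unparse_template_loop, unparse_template_go]
  | case2 rest ih =>
    intro buf
    cases rest with
    | nil => simp [unparse_template_loop, unparse_template_go]
    | cons c r =>
      simp only [unparse_template_go, List.take, List.drop] at *
      simp [unparse_template_loop, ih]
  | case3 rest =>
    intro buf
    simp [unparse_template_loop, unparse_template_go, loop_in_block]
  | case4 rest ih =>
    intro buf
    simp [unparse_template_loop, unparse_template_go, ih]
  | case5 rest ih =>
    intro buf
    simp [unparse_template_loop, unparse_template_go, ih]
  | case6 ch rest h1 h2 h3 h4 ih =>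
    intro buf
    have hd : ch ≠ '.' := h4
    have hb : ch ≠ '\\' := h1
    have hk : ch ≠ '[' := h2
    have hpat : ¬(ch = '(' ∧ List.take 3 rest = ['.', '*', ')']) := by
      rintro ⟨hc, ht⟩
      cases rest with
      | nil => simp at ht
      | cons a t1 =>
        cases t1 with
        | nil => simp at ht
        | cons b t2 =>
          cases t2 with
          | nil => simp at ht
          | cons c t3 =>
            simp at ht
            exact h3 t3 hc (by rw [ht.1, ht.2.1, ht.2.2])
    by_cases hrb : ch = ']'
    · subst hrb
      simp [unparse_template_loop, unparse_template_go, ih]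
    · simp [unparse_template_loop, unparse_template_go, ih, hd, hb, hk, hrb, hpat]

-- ===== VERDICT (by name: the statement is the Claim_ definition above) =====
theorem unparse_template_spec : Claim_equal_unparse_template := by
  intro text _
  unfold Spec_unparse_template unparse_template unparse_template_alt
  rw [loop_eq_go]
  simp
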